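-- pv_equiv track=rewrite | github.com/stars-end/affordabot | backend/services/pipeline/structured_source_enrichment.py | _non_fee_template_metadata
-- ===== SOURCE A (Python) =====
-- from typing import Any
--
-- def _non_fee_template_metadata(
--     facts: list[dict[str, Any]],
-- ) -> tuple[list[str], list[str], str, str | None]:
--     policy_families = sorted(
--         {
--             str(fact.get("policy_family") or "").strip()
--             for fact in facts
--             if str(fact.get("policy_family") or "").strip()
--         }
--     )
--     evidence_uses = sorted(
--         {
--             str(fact.get("evidence_use") or "").strip()
--             for fact in facts
--             if str(fact.get("evidence_use") or "").strip()
--         }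
--     )
--     relevance_values = [
--         str(fact.get("economic_relevance") or "").strip()
--         for fact in facts
--         if str(fact.get("economic_relevance") or "").strip()
--     ]
--     relevance_priority = {"direct": 0, "indirect": 1, "contextual": 2, "none": 3, "unknown": 4}
--     economic_relevance = sorted(
--         relevance_values,
--         key=lambda value: relevance_priority.get(value, 99),
--     )[0] if relevance_values else "unknown"
--     moat_reason = next(
--         (
--             str(fact.get("moat_value_reason") or "").strip()
--             for fact in facts
--             if str(fact.get("moat_value_reason") or "").strip()
--         ),
--         None,
--     )
--     return policy_families, evidence_uses, economic_relevance, moat_reason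
-- ===== SOURCE B (Python) =====
-- from typing import Any
--
-- _RELEVANCE_PRIORITY = {"direct": 0, "indirect": 1, "contextual": 2, "none": 3, "unknown": 4}
--
--
-- def _non_fee_template_metadata(
--     facts: list[dict[str, Any]],
-- ) -> tuple[list[str], list[str], str, str | None]:
--     policy_set: set[str] = set()
--     evidence_set: set[str] = set()
--     best: str | None = None
--     moat: str | None = None
--     for fact in facts:
--         pf = str(fact.get("policy_family") or "").strip()
--         if pf:
--             policy_set.add(pf)
--         eu = str(fact.get("evidence_use") or "").strip()
--         if eu:
--             evidence_set.add(eu)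
--         er = str(fact.get("economic_relevance") or "").strip()
--         if er:
--             if best is None or _RELEVANCE_PRIORITY.get(er, 99) < _RELEVANCE_PRIORITY.get(best, 99):
--                 best = er
--         if moat is None:
--             mr = str(fact.get("moat_value_reason") or "").strip()
--             if mr:
--                 moat = mr
--     return sorted(policy_set), sorted(evidence_set), best if best is not None else "unknown", moat
-- ===== Notes on version B (the rewrite author's own statement) =====
-- stated objective: alternative
-- what changed: Replaces four separate comprehension passes over facts (two set comprehensions, a sorted-by-priority list, and a generator next()) with one loop maintaining two sets, a running minimum-priority relevance (strict-less replacement reproduces the stable sort's first-tie pick), and the first non-empty moat reason.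
import Mathlib
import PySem

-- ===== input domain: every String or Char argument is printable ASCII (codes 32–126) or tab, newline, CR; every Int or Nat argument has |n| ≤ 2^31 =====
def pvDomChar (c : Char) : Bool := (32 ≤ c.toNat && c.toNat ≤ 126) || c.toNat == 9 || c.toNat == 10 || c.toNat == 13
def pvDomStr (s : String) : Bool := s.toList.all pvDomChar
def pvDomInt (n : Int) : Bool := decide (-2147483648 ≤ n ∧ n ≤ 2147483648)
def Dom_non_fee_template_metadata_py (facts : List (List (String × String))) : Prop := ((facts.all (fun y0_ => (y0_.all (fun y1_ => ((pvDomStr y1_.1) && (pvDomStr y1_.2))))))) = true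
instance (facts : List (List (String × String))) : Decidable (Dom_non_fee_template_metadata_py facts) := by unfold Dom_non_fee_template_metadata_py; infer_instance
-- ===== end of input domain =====

-- B replaces A's four independent comprehension passes over `facts` by a single loop that
-- maintains two sets, a running minimum-priority relevance and the first non-empty moat reason
-- (objective: alternative decomposition, same asymptotic cost).

-- shared field extraction: str(fact.get(k) or "").strip()
def pvField (fact : List (String × String)) (k : String) : String :=
  PySem.Str.strip ((List.lookup k fact).getD "")

-- the stripped field, kept only when truthy (the comprehensions' filter / B's `if`)
def pvPick (fact : List (String × String)) (k : String) : Option String :=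
  let v := pvField fact k
  if v ≠ "" then some v else none

def pvPrioDict : List (String × Int) :=
  [("direct", 0), ("indirect", 1), ("contextual", 2), ("none", 3), ("unknown", 4)]

-- relevance_priority.get(value, 99)
def pvKey (v : String) : Int := (List.lookup v pvPrioDict).getD 99

-- ===== PORT A =====
def non_fee_template_metadata_py (facts : List (List (String × String))) : List String × List String × String × Option String :=
  let policy_families :=
    PySem.List.sorted (PySem.Set.ofList (facts.filterMap (fun fact => pvPick fact "policy_family"))) (fun x => x)
  let evidence_uses :=
    PySem.List.sorted (PySem.Set.ofList (facts.filterMap (fun fact => pvPick fact "evidence_use"))) (fun x => x)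
  let relevance_values := facts.filterMap (fun fact => pvPick fact "economic_relevance")
  let economic_relevance :=
    if relevance_values.isEmpty then "unknown"
    else (PySem.List.sorted relevance_values pvKey).headD "unknown"
  let moat_reason := facts.findSome? (fun fact => pvPick fact "moat_value_reason")
  (policy_families, evidence_uses, economic_relevance, moat_reason)

-- ===== PORT B =====
-- one loop body over the 4-component state (policy set, evidence set, best relevance, moat reason)
def pvStep (st : PySem.Set String × PySem.Set String × Option String × Option String)
    (fact : List (String × String)) :
    PySem.Set String × PySem.Set String × Option String × Option String :=
  match st with
  | (ps, es, best, moat) =>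
    let ps := match pvPick fact "policy_family" with
      | some v => PySem.Set.add ps v
      | none => ps
    let es := match pvPick fact "evidence_use" with
      | some v => PySem.Set.add es v
      | none => es
    let best := match pvPick fact "economic_relevance" with
      | some v =>
        match best with
        | none => some v
        | some b => if pvKey v < pvKey b then some v else some b
      | none => best
    let moat := match moat with
      | some _ => moat
      | none => pvPick fact "moat_value_reason"
    (ps, es, best, moat)

def non_fee_template_metadata_py_alt (facts : List (List (String × String))) : List String × List String × String × Option String :=
  match facts.foldl pvStep (PySem.Set.empty, PySem.Set.empty, none, none) with
  | (ps, es, best, moat) =>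
    (PySem.List.sorted ps (fun x => x), PySem.List.sorted es (fun x => x),
     best.getD "unknown", moat)

-- ===== PRECONDITION & SPEC =====
def Spec_non_fee_template_metadata_py (facts : List (List (String × String))) (out : List String × List String × String × Option String) : Prop := out = non_fee_template_metadata_py_alt facts
instance (facts : List (List (String × String))) (out : List String × List String × String × Option String) : Decidable (Spec_non_fee_template_metadata_py facts out) := by unfold Spec_non_fee_template_metadata_py; infer_instance

-- ===== CLAIM (what is proved, stated in full; the proofs are below) =====
def Claim_equal_non_fee_template_metadata_py : Prop := ∀ (facts : List (List (String × String))), Dom_non_fee_template_metadata_py facts → Spec_non_fee_template_metadata_py facts (non_fee_template_metadata_py facts)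

-- ===== LEMMAS AND PROOFS =====

-- the four per-component loop bodies pvStep is made of
def pvStepSet (k : String) (s : PySem.Set String) (fact : List (String × String)) : PySem.Set String :=
  match pvPick fact k with
  | some v => PySem.Set.add s v
  | none => s

def pvTrack (b : Option String) (v : String) : Option String :=
  match b with
  | none => some v
  | some b0 => if pvKey v < pvKey b0 then some v else some b0

def pvStepBest (b : Option String) (fact : List (String × String)) : Option String :=
  match pvPick fact "economic_relevance" with
  | some v => pvTrack b v
  | none => b

def pvStepMoat (m : Option String) (fact : List (String × String)) : Option String :=
  match m with
  | some _ => m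
  | none => pvPick fact "moat_value_reason"

theorem pvStep_decompose (facts : List (List (String × String)))
    (ps es : PySem.Set String) (b m : Option String) :
    facts.foldl pvStep (ps, es, b, m) =
      (facts.foldl (pvStepSet "policy_family") ps,
       facts.foldl (pvStepSet "evidence_use") es,
       facts.foldl pvStepBest b,
       facts.foldl pvStepMoat m) := by
  induction facts generalizing ps es b m with
  | nil => rfl
  | cons f t ih =>
    simp only [List.foldl_cons, pvStep, pvStepSet, pvStepBest, pvStepMoat, pvTrack]
    rw [ih]

theorem pvStepSet_foldl (k : String) (facts : List (List (String × String))) (acc : PySem.Set String) :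
    facts.foldl (pvStepSet k) acc =
      (facts.filterMap (fun f => pvPick f k)).foldl PySem.Set.add acc := by
  induction facts generalizing acc with
  | nil => rfl
  | cons f t ih =>
    simp only [List.foldl_cons, List.filterMap_cons, pvStepSet]
    cases pvPick f k <;> simp [ih]

theorem pvStepMoat_some (facts : List (List (String × String))) (x : String) :
    facts.foldl pvStepMoat (some x) = some x := by
  induction facts with
  | nil => rfl
  | cons f t ih => simpa [pvStepMoat] using ih

theorem pvStepMoat_foldl (facts : List (List (String × String))) :
    facts.foldl pvStepMoat none = facts.findSome? (fun f => pvPick f "moat_value_reason") := by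
  induction facts with
  | nil => rfl
  | cons f t ih =>
    simp only [List.foldl_cons, List.findSome?_cons, pvStepMoat]
    cases h : pvPick f "moat_value_reason" with
    | none => simpa using ih
    | some v => simp [pvStepMoat_some]

theorem pvStepBest_foldl (facts : List (List (String × String))) (b : Option String) :
    facts.foldl pvStepBest b =
      (facts.filterMap (fun f => pvPick f "economic_relevance")).foldl pvTrack b := by
  induction facts generalizing b with
  | nil => rfl
  | cons f t ih =>
    simp only [List.foldl_cons, List.filterMap_cons, pvStepBest]
    cases pvPick f "economic_relevance" <;> simp [ih]

-- the running strict-less tracker picks exactly the head of the stable sort by priority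
theorem pvTrack_head (vs : List String) (hne : vs ≠ []) :
    ∃ m t, PySem.List.sorted vs pvKey = m :: t ∧ vs.foldl pvTrack none = some m := by
  induction vs using List.reverseRecOn with
  | nil => exact absurd rfl hne
  | append_singleton vs v ih =>
    rw [PySem.List.sorted_eq_foldl_insertBy, List.foldl_append, List.foldl_append,
      ← PySem.List.sorted_eq_foldl_insertBy]
    rcases eq_or_ne vs [] with rfl | hvs
    · exact ⟨v, [], rfl, rfl⟩
    · obtain ⟨m, t, hs, hf⟩ := ih hvs
      rw [hs, hf]
      simp only [List.foldl_cons, List.foldl_nil, PySem.List.insertBy, pvTrack]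
      by_cases h : pvKey v < pvKey m
      · exact ⟨v, m :: t, by simp [h], by simp [h]⟩
      · exact ⟨m, PySem.List.insertBy (fun a b => decide (pvKey a < pvKey b)) v t,
          by simp [h], by simp [h]⟩

-- ===== VERDICT (by name: the statement is the Claim_ definition above) =====
theorem non_fee_template_metadata_py_spec : Claim_equal_non_fee_template_metadata_py := by
  intro facts _
  unfold Spec_non_fee_template_metadata_py
  unfold non_fee_template_metadata_py non_fee_template_metadata_py_alt
  rw [pvStep_decompose, pvStepSet_foldl, pvStepSet_foldl, pvStepBest_foldl, pvStepMoat_foldl]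
  simp only [PySem.Set.ofList]
  refine Prod.ext rfl (Prod.ext rfl (Prod.ext ?_ rfl))
  cases h : facts.filterMap (fun f => pvPick f "economic_relevance") with
  | nil => rfl
  | cons v t =>
    obtain ⟨m, t', hs, hf⟩ := pvTrack_head (v :: t) (by simp)
    simp [hs, hf]
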